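-- pv_equiv track=rewrite | github.com/jjoshua2/arc_agi | dupes/6cdd2623_group-027/train_only/1017.py | transform
-- ===== SOURCE A (Python) =====
-- def transform(grid: list[list[int]]) -> list[list[int]]:
--     if not grid or not grid[0]:
--         return []
--     rows = len(grid)
--     cols = len(grid[0])
--     output = [[0] * cols for _ in range(rows)]
--
--     # Fill horizontal lines
--     for i in range(rows):
--         left = grid[i][0]
--         right = grid[i][cols - 1]
--         if left == right and left != 0:
--             C = left
--             for j in range(cols):
--                 output[i][j] = C
--
--     # Fill vertical lines
--     for j in range(cols):
--         top = grid[0][j]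
--         bottom = grid[rows - 1][j]
--         if top == bottom and top != 0:
--             C = top
--             for i in range(rows):
--                 output[i][j] = C
--
--     return output
-- ===== SOURCE B (Python) =====
-- def transform(grid: list[list[int]]) -> list[list[int]]:
--     if not grid or not grid[0]:
--         return []
--     cols = len(grid[0])
--     first, last = grid[0], grid[-1]
--     out = []
--     for row in grid:
--         c = row[0]
--         row_match = c == row[cols - 1] != 0
--         out.append([t if t == b != 0 else (c if row_match else 0)
--                     for t, b in zip(first, last)])
--     return out
-- ===== Notes on version B (the rewrite author's own statement) =====
-- stated objective: alternative
-- what changed: Replaces A's zero-grid allocation and two in-place overwrite passes with a single mutation-free pass that computes each cell directly by zipping the first and last rows (the column endpoints) against the current row's endpoints; no intermediate grid, no fill tables, no overwriting.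
import Mathlib
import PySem

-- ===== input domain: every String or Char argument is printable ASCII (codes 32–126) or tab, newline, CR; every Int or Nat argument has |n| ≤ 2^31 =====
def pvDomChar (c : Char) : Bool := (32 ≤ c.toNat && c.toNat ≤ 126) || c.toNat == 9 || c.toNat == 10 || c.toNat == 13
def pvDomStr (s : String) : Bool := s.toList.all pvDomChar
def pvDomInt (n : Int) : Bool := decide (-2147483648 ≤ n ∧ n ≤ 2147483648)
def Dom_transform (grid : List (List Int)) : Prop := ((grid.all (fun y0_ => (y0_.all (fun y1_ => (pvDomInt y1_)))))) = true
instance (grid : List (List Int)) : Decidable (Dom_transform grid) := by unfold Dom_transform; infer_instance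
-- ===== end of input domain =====

-- B replaces A's zero-grid allocation and two in-place overwrite passes with one
-- mutation-free pass computing each cell directly from the zipped first/last rows
-- and the current row's endpoints (alternative decomposition, same cost).

-- ===== PORT A =====
def transform (grid : List (List Int)) : List (List Int) :=
  if grid = [] ∨ grid.headD [] = [] then []
  else
    let rows := grid.length
    let cols := (grid.headD []).length
    let output := List.replicate rows (List.replicate cols (0:Int))
    -- Fill horizontal lines
    let output := (List.range rows).foldl (fun out i =>
      if (grid.getD i []).getD 0 0 = (grid.getD i []).getD (cols - 1) 0 ∧
         (grid.getD i []).getD 0 0 ≠ 0 then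
        out.set i ((List.range cols).foldl
          (fun row j => row.set j ((grid.getD i []).getD 0 0)) (out.getD i []))
      else out) output
    -- Fill vertical lines
    let output := (List.range cols).foldl (fun out j =>
      if (grid.getD 0 []).getD j 0 = (grid.getD (rows - 1) []).getD j 0 ∧
         (grid.getD 0 []).getD j 0 ≠ 0 then
        (List.range rows).foldl
          (fun o i => o.set i ((o.getD i []).set j ((grid.getD 0 []).getD j 0))) out
      else out) output
    output

-- ===== PORT B =====
def transform_alt (grid : List (List Int)) : List (List Int) :=
  if grid = [] ∨ grid.headD [] = [] then []
  else
    let first := grid.headD []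
    let last := (grid.getLast?).getD []
    let cols := (grid.headD []).length
    grid.map (fun r =>
      let c := r.getD 0 0
      let rowMatch := c = r.getD (cols - 1) 0 ∧ c ≠ 0
      (first.zip last).map (fun tb =>
        if tb.1 = tb.2 ∧ tb.1 ≠ 0 then tb.1
        else if rowMatch then c else 0))

-- ===== PRECONDITION & SPEC =====
-- Pre_ excludes exactly the ragged grids on which Python A raises IndexError
-- (a row shorter than the first row, read by grid[i][cols-1]).
def Pre_transform (grid : List (List Int)) : Prop :=
  ∀ r ∈ grid, (grid.headD []).length ≤ r.length
instance (grid : List (List Int)) : Decidable (Pre_transform grid) := by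
  unfold Pre_transform; infer_instance

def pvWitness_transform : List (List Int) := [[1, 0, 1], [0, 0, 0], [2, 0, 1]]

def Spec_transform (grid : List (List Int)) (out : List (List Int)) : Prop := out = transform_alt grid
instance (grid : List (List Int)) (out : List (List Int)) : Decidable (Spec_transform grid out) := by unfold Spec_transform; infer_instance

-- ===== CLAIM (what is proved, stated in full; the proofs are below) =====
def Claim_equal_transform : Prop := ∀ (grid : List (List Int)), Dom_transform grid → Pre_transform grid → Spec_transform grid (transform grid)

-- ===== LEMMAS AND PROOFS =====

-- Closed form of a fold over `range n` whose step rewrites only slot i (guarded).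
lemma foldl_range_set_gen {α : Type} (d : α) (cond : Nat → Prop) [DecidablePred cond]
    (F : Nat → α → α) :
    ∀ (n : Nat) (l : List α),
      (List.range n).foldl
        (fun out i => if cond i then out.set i (F i (out.getD i d)) else out) l
      = l.mapIdx (fun i x => if i < n ∧ cond i then F i x else x) := by
  intro n
  induction n with
  | zero =>
    intro l
    simp [List.ext_getElem_iff]
  | succ n ih =>
    intro l
    rw [List.range_succ, List.foldl_append, ih]
    by_cases hc : cond n
    · simp only [List.foldl, hc, if_pos]
      apply List.ext_getElem
      · simp
      · intro i h1 h2
        simp only [List.getElem_set, List.getElem_mapIdx]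
        by_cases hin : n = i
        · subst hin
          have hl : n < l.length := by simpa using h2
          rw [if_pos rfl]
          have hd : (l.mapIdx (fun i x => if i < n ∧ cond i then F i x else x)).getD n d
              = l[n] := by
            rw [List.getD_eq_getElem?_getD]
            simp [hl]
          rw [hd]
          have : n < n + 1 ∧ cond n := ⟨by omega, hc⟩
          simp [this]
        · simp only [if_neg hin]
          have : (i < n ∧ cond i) ↔ (i < n + 1 ∧ cond i) := by
            constructor <;> rintro ⟨h, hcx⟩ <;> exact ⟨by omega, hcx⟩
          simp [this]
    · simp only [List.foldl, hc, if_false]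
      apply List.ext_getElem
      · simp
      · intro i h1 h2
        simp only [List.getElem_mapIdx]
        have : (i < n ∧ cond i) ↔ (i < n + 1 ∧ cond i) := by
          constructor <;> rintro ⟨h, hcx⟩
          · exact ⟨by omega, hcx⟩
          · refine ⟨?_, hcx⟩
            rcases Nat.lt_succ_iff_lt_or_eq.1 h with h' | h'
            · exact h'
            · exact absurd hcx (h' ▸ hc)
        simp [this]

-- Unguarded variant.
lemma foldl_range_set_gen' {α : Type} (d : α) (F : Nat → α → α) (n : Nat) (l : List α) :
    (List.range n).foldl (fun out i => out.set i (F i (out.getD i d))) l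
      = l.mapIdx (fun i x => if i < n then F i x else x) := by
  have h := foldl_range_set_gen d (fun _ => True) F n l
  simpa using h

-- Guarded variant writing a value that does not depend on the old slot content.
lemma foldl_range_set_const {α : Type} (d : α) (cond : Nat → Prop) [DecidablePred cond]
    (c : Nat → α) (n : Nat) (l : List α) :
    (List.range n).foldl (fun out i => if cond i then out.set i (c i) else out) l
      = l.mapIdx (fun i x => if i < n ∧ cond i then c i else x) := by
  have h := foldl_range_set_gen d cond (fun i _ => c i) n l
  simpa using h

-- Vertical pass of A: the column-setting fold is a per-row map.
lemma foldl_vert {rows : Nat} (cond : Nat → Prop) [DecidablePred cond] (c : Nat → Int) :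
    ∀ (js : List Nat) (l : List (List Int)), l.length ≤ rows →
      js.foldl (fun out j =>
        if cond j then
          (List.range rows).foldl (fun o i => o.set i ((o.getD i []).set j (c j))) out
        else out) l
      = l.map (fun x => js.foldl (fun x j => if cond j then x.set j (c j) else x) x) := by
  intro js
  induction js with
  | nil => intro l _; simp
  | cons j js ih =>
    intro l hl
    simp only [List.foldl_cons]
    by_cases hc : cond j
    · rw [if_pos hc]
      have h := foldl_range_set_gen' ([] : List Int) (fun _ x => x.set j (c j)) rows l
      rw [h]
      have hmap : l.mapIdx (fun i x => if i < rows then x.set j (c j) else x)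
          = l.map (fun x => x.set j (c j)) := by
        apply List.ext_getElem
        · simp
        · intro i h1 h2
          have : i < rows := by simp at h1; omega
          simp [this]
      rw [hmap, ih _ (by simpa using hl), List.map_map]
      apply List.map_congr_left
      intro x _
      simp [hc]
    · rw [if_neg hc, ih _ hl]
      apply List.map_congr_left
      intro x _
      simp [hc]

-- The horizontal inner fold fills a zero row completely.
lemma fill_row (cols : Nat) (C : Int) :
    (List.range cols).foldl (fun row j => row.set j C) (List.replicate cols (0:Int))
      = List.replicate cols C := by
  have h := foldl_range_set_gen' (0:Int) (fun _ _ => C) cols (List.replicate cols (0:Int))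
  simp only [] at h
  rw [h]
  apply List.ext_getElem
  · simp
  · intro i h1 h2
    have : i < cols := by simpa using h2
    simp [this]

lemma getLast?_getD (grid : List (List Int)) (h : grid ≠ []) :
    (grid.getLast?).getD [] = grid.getD (grid.length - 1) [] := by
  rw [List.getLast?_eq_getElem?]
  rcases List.exists_cons_of_ne_nil h with ⟨a, t, rfl⟩
  simp [List.getD_eq_getElem?_getD]

set_option maxHeartbeats 2000000 in
lemma transform_eq_alt (grid : List (List Int)) (hpre : Pre_transform grid) :
    transform grid = transform_alt grid := by
  by_cases hg : grid = [] ∨ grid.headD [] = []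
  · unfold transform transform_alt
    rw [if_pos hg, if_pos hg]
  · unfold transform transform_alt
    rw [if_neg hg, if_neg hg]
    rw [not_or] at hg
    obtain ⟨hne, hhd⟩ := hg
    simp only []
    rw [foldl_range_set_gen ([] : List Int)
        (fun i => (grid.getD i []).getD 0 0 = (grid.getD i []).getD ((grid.headD []).length - 1) 0 ∧
          (grid.getD i []).getD 0 0 ≠ 0)
        (fun i x => (List.range (grid.headD []).length).foldl
          (fun row j => row.set j ((grid.getD i []).getD 0 0)) x)]
    rw [foldl_vert (rows := grid.length)
        (fun j => (grid.getD 0 []).getD j 0 = (grid.getD (grid.length - 1) []).getD j 0 ∧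
          (grid.getD 0 []).getD j 0 ≠ 0)
        (fun j => (grid.getD 0 []).getD j 0) _ _ (by simp)]
    have hpos : 0 < grid.length := List.length_pos_of_ne_nil hne
    have hhd0 : grid.getD 0 [] = grid.headD [] := by
      rcases List.exists_cons_of_ne_nil hne with ⟨a, t, rfl⟩; simp
    have hlast := getLast?_getD grid hne
    have hlastlen : (grid.headD []).length ≤ ((grid.getLast?).getD []).length := by
      rw [hlast]
      have hm : grid.getD (grid.length - 1) [] = grid[grid.length - 1]'(by omega) :=
        List.getD_eq_getElem grid [] (by omega)
      rw [hm]
      exact hpre _ (List.getElem_mem _)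
    apply List.ext_getElem
    · simp only [List.length_map, List.length_mapIdx, List.length_replicate]
    · intro i hi1 hi2
      have hi : i < grid.length := by simpa using hi1
      have hgi : grid.getD i [] = grid[i] := List.getD_eq_getElem grid [] hi
      simp only [List.getElem_map, List.getElem_mapIdx, List.getElem_replicate]
      rw [fill_row (grid.headD []).length ((grid.getD i []).getD 0 0)]
      -- bridge B's reads to the getD reads A uses
      have hc : grid[i].getD 0 0 = (grid.getD i []).getD 0 0 := by rw [hgi]
      have hr : grid[i].getD ((grid.headD []).length - 1) 0
          = (grid.getD i []).getD ((grid.headD []).length - 1) 0 := by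
        rw [hgi]
      by_cases hH : (grid.getD i []).getD 0 0 = (grid.getD i []).getD ((grid.headD []).length - 1) 0 ∧
          (grid.getD i []).getD 0 0 ≠ 0
      · rw [if_pos ⟨hi, hH⟩]
        rw [foldl_range_set_const (0:Int) _
          (fun j => (grid.getD 0 []).getD j 0) (grid.headD []).length
          (List.replicate (grid.headD []).length ((grid.getD i []).getD 0 0))]
        apply List.ext_getElem
        · simp only [List.length_mapIdx, List.length_replicate, List.length_map,
            List.length_zip]
          exact (Nat.min_eq_left hlastlen).symm
        · intro j hj1 hj2
          have hj : j < (grid.headD []).length := by simpa using hj1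
          have hjl : j < ((grid.getLast?).getD []).length :=
            lt_of_lt_of_le hj hlastlen
          have hA : (grid.headD [])[j]'hj = (grid.getD 0 []).getD j 0 := by
            rw [hhd0, List.getD_eq_getElem _ _ hj]
          have hB : ((grid.getLast?).getD [])[j]'hjl
              = (grid.getD (grid.length - 1) []).getD j 0 := by
            rw [← hlast, List.getD_eq_getElem _ _ hjl]
          simp only [List.getElem_map, List.getElem_zip, List.getElem_mapIdx,
            List.getElem_replicate, hA, hB, hc, hr]
          by_cases hV : (grid.getD 0 []).getD j 0 = (grid.getD (grid.length - 1) []).getD j 0 ∧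
              (grid.getD 0 []).getD j 0 ≠ 0
          · rw [if_pos ⟨hj, hV⟩, if_pos hV]
          · rw [if_neg (fun h => hV h.2), if_neg hV, if_pos hH]
      · rw [if_neg (fun h => hH h.2)]
        rw [foldl_range_set_const (0:Int) _
          (fun j => (grid.getD 0 []).getD j 0) (grid.headD []).length
          (List.replicate (grid.headD []).length (0:Int))]
        apply List.ext_getElem
        · simp only [List.length_mapIdx, List.length_replicate, List.length_map,
            List.length_zip]
          exact (Nat.min_eq_left hlastlen).symm
        · intro j hj1 hj2
          have hj : j < (grid.headD []).length := by simpa using hj1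
          have hjl : j < ((grid.getLast?).getD []).length :=
            lt_of_lt_of_le hj hlastlen
          have hA : (grid.headD [])[j]'hj = (grid.getD 0 []).getD j 0 := by
            rw [hhd0, List.getD_eq_getElem _ _ hj]
          have hB : ((grid.getLast?).getD [])[j]'hjl
              = (grid.getD (grid.length - 1) []).getD j 0 := by
            rw [← hlast, List.getD_eq_getElem _ _ hjl]
          simp only [List.getElem_map, List.getElem_zip, List.getElem_mapIdx,
            List.getElem_replicate, hA, hB, hc, hr]
          by_cases hV : (grid.getD 0 []).getD j 0 = (grid.getD (grid.length - 1) []).getD j 0 ∧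
              (grid.getD 0 []).getD j 0 ≠ 0
          · rw [if_pos ⟨hj, hV⟩, if_pos hV]
          · rw [if_neg (fun h => hV h.2), if_neg hV, if_neg hH]

-- ===== VERDICT (by name: the statement is the Claim_ definition above) =====
theorem transform_spec : Claim_equal_transform := by
  intro grid _ hpre
  unfold Spec_transform
  exact transform_eq_alt grid hpre
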